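-- pv_equiv track=rewrite | github.com/KantiCodes/chess-raspberrypi | src/chessboard_utills.py | translate_fe_notation
-- ===== SOURCE A (Python) =====
-- def translate_fe_notation(fe_notation: str) -> str:
--     """
--     Translates Forysyth-Edwards notation where chess type is disregarded - WBE notation.
--
--      Any white piece will be replaced with "W" and any black piece will be replaced with "B", an empty field will be
--      replaced with "E".
--     """
--     WBE_notation = ''
--     for row in fe_notation.split('-'):
--         for el in row:
--             if el.isdigit():
--                 WBE_notation = f'{WBE_notation}{"E" * int(el)}'
--             if el.isupper():
--                 WBE_notation = f'{WBE_notation}W'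
--             elif el.islower():
--                 WBE_notation = f'{WBE_notation}B'
--
--         WBE_notation = f'{WBE_notation}-'
--
--     return WBE_notation[:-1]  # get rid of the last "-"
-- ===== SOURCE B (Python) =====
-- def translate_fe_notation(fe_notation: str) -> str:
--     """Single pass over the characters; collect pieces and join once."""
--     parts = []
--     for ch in fe_notation:
--         if ch == '-':
--             parts.append('-')
--         elif ch.isdigit():
--             parts.append('E' * int(ch))
--         elif ch.isupper():
--             parts.append('W')
--         elif ch.islower():
--             parts.append('B')
--     return ''.join(parts)
-- ===== Notes on version B (the rewrite author's own statement) =====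
-- stated objective: faster
-- what changed: Single pass over the characters, treating the row separator inline and collecting pieces into a list joined once, instead of splitting into rows, a nested loop with repeated f-string concatenation, and a final strip of the trailing separator.
import Mathlib
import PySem

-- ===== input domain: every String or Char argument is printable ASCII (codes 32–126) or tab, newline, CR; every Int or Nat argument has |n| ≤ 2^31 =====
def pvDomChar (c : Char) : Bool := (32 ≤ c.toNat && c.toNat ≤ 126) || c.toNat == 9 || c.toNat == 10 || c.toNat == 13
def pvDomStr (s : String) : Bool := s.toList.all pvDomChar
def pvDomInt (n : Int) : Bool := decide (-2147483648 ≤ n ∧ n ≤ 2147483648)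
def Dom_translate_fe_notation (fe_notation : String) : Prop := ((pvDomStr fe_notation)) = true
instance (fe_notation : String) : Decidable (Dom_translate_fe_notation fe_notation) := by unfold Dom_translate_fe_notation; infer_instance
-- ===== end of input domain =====

-- B replaces split('-') + nested loop + string concatenation + [:-1] by one pass over the
-- characters collecting pieces joined once (measured faster in a timing run).


-- ===== PORT A =====
-- body of A's inner loop: one character `el` of a row
def pvStepA (acc : List Char) (el : Char) : List Char :=
  let acc1 := if PySem.Chars.isdigit el
    -- int(el): el is guarded by isdigit, hence an ASCII digit on Dom, so int(el) = el.toNat - 48 (exact)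
    then acc ++ PySem.List.pyRepeat ['E'] ((el.toNat : Int) - 48)
    else acc
  if PySem.Chars.isupper el then acc1 ++ ['W']
  else if PySem.Chars.islower el then acc1 ++ ['B']
  else acc1

def translate_fe_notation (fe_notation : String) : String :=
  let rows := PySem.Chars.splitOn fe_notation.toList ['-']        -- fe_notation.split('-')
  let w := rows.foldl (fun acc row => (row.foldl pvStepA acc) ++ ['-']) []
  String.mk (PySem.Chars.slice w none (some (-1)))                -- WBE_notation[:-1]

-- ===== PORT B =====
-- the piece B appends for one character (empty for unknown characters)
def pvPartB (ch : Char) : List Char :=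
  if ch = '-' then ['-']
  else if PySem.Chars.isdigit ch then PySem.List.pyRepeat ['E'] ((ch.toNat : Int) - 48)  -- 'E' * int(ch)
  else if PySem.Chars.isupper ch then ['W']
  else if PySem.Chars.islower ch then ['B']
  else []

def translate_fe_notation_alt (fe_notation : String) : String :=
  String.mk ((fe_notation.toList.map pvPartB).flatten)            -- ''.join(parts)

-- ===== PRECONDITION & SPEC =====
def Spec_translate_fe_notation (fe_notation : String) (out : String) : Prop := out = translate_fe_notation_alt fe_notation
instance (fe_notation : String) (out : String) : Decidable (Spec_translate_fe_notation fe_notation out) := by unfold Spec_translate_fe_notation; infer_instance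

-- ===== CLAIM (what is proved, stated in full; the proofs are below) =====
def Claim_equal_translate_fe_notation : Prop := ∀ (fe_notation : String), Dom_translate_fe_notation fe_notation → Spec_translate_fe_notation fe_notation (translate_fe_notation fe_notation)

-- ===== LEMMAS AND PROOFS =====

-- the piece A's inner-loop body appends for one (non-'-') character
def pvPartA (c : Char) : List Char :=
  (if PySem.Chars.isdigit c then PySem.List.pyRepeat ['E'] ((c.toNat : Int) - 48) else []) ++
  (if PySem.Chars.isupper c then ['W'] else if PySem.Chars.islower c then ['B'] else [])

theorem pvStepA_eq (acc : List Char) (c : Char) : pvStepA acc c = acc ++ pvPartA c := by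
  unfold pvStepA pvPartA
  split_ifs <;> simp

-- on a non-separator character B's piece is exactly A's piece
theorem pvPartB_eq (c : Char) (h : c ≠ '-') : pvPartB c = pvPartA c := by
  unfold pvPartB pvPartA
  rw [if_neg h]
  by_cases hd : PySem.Chars.isdigit c = true
  · have hu : PySem.Chars.isupper c = false := by
      simp [PySem.Chars.isdigit, PySem.Chars.isupper, Char.le_def, UInt32.le_iff_toNat_le] at *
      omega
    have hl : PySem.Chars.islower c = false := by
      simp [PySem.Chars.isdigit, PySem.Chars.islower, Char.le_def, UInt32.le_iff_toNat_le] at *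
      omega
    simp [hd, hu, hl]
  · simp only [Bool.not_eq_true] at hd
    simp [hd]

-- A's inner loop appends the per-character pieces of the row
theorem pvRowFold (row : List Char) (acc : List Char) :
    row.foldl pvStepA acc = acc ++ row.flatMap pvPartA := by
  induction row generalizing acc with
  | nil => simp
  | cons c r ih => simp [List.foldl_cons, pvStepA_eq, ih]

-- A's outer loop flattens (piece-translated row ++ ['-']) over all rows
theorem pvOuterFold (rows : List (List Char)) (acc : List Char) :
    rows.foldl (fun acc row => (row.foldl pvStepA acc) ++ ['-']) acc
      = acc ++ (rows.map (fun r => r.flatMap pvPartA ++ ['-'])).flatten := by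
  induction rows generalizing acc with
  | nil => simp
  | cons r rs ih => simp [List.foldl_cons, pvRowFold, ih]

-- pure characterisation of splitOn on the single-character separator '-'
def pvSplitDash : List Char → List (List Char)
  | [] => [[]]
  | c :: r =>
    if c = '-' then [] :: pvSplitDash r
    else match pvSplitDash r with
      | [] => [[c]]
      | p :: ps => (c :: p) :: ps

theorem pvSplitDash_ne_nil (l : List Char) : pvSplitDash l ≠ [] := by
  cases l with
  | nil => simp [pvSplitDash]
  | cons c r =>
    simp only [pvSplitDash]
    split_ifs
    · simp
    · cases pvSplitDash r <;> simp

theorem pvGo_spec (fuel : Nat) (l cur : List Char) (acc : List (List Char)) (h : l.length < fuel) :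
    PySem.Chars.splitOn.go ['-'] fuel l cur acc
      = acc.reverse ++
        (match pvSplitDash l with
         | [] => []
         | p :: ps => (cur.reverse ++ p) :: ps) := by
  induction fuel generalizing l cur acc with
  | zero => omega
  | succ fuel ih =>
    cases l with
    | nil => simp [PySem.Chars.splitOn.go, pvSplitDash]
    | cons c rest =>
      have hlen : rest.length < fuel := by simpa using h
      by_cases hc : c = '-'
      · subst hc
        rw [show PySem.Chars.splitOn.go ['-'] (fuel+1) ('-' :: rest) cur acc
              = PySem.Chars.splitOn.go ['-'] fuel rest [] (cur.reverse :: acc) by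
            simp [PySem.Chars.splitOn.go, List.isPrefixOf]]
        rw [ih rest [] (cur.reverse :: acc) hlen]
        simp only [pvSplitDash, if_pos rfl]
        cases hsd : pvSplitDash rest with
        | nil => exact absurd hsd (pvSplitDash_ne_nil rest)
        | cons p ps => simp
      · rw [show PySem.Chars.splitOn.go ['-'] (fuel+1) (c :: rest) cur acc
              = PySem.Chars.splitOn.go ['-'] fuel rest (c :: cur) acc by
            simp [PySem.Chars.splitOn.go, List.isPrefixOf, hc, (by simpa [eq_comm] using hc : ¬ ('-' = c))]]
        rw [ih rest (c :: cur) acc hlen]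
        simp only [pvSplitDash, if_neg hc]
        cases hsd : pvSplitDash rest with
        | nil => exact absurd hsd (pvSplitDash_ne_nil rest)
        | cons p ps => simp

theorem pvSplitOn_eq (l : List Char) : PySem.Chars.splitOn l ['-'] = pvSplitDash l := by
  unfold PySem.Chars.splitOn
  rw [pvGo_spec (l.length + 1) l [] ([] : List (List Char)) (by omega)]
  cases hsd : pvSplitDash l with
  | nil => exact absurd hsd (pvSplitDash_ne_nil l)
  | cons p ps => simp

-- join with '-' separators
def pvJoinDash : List (List Char) → List Char
  | [] => []
  | [p] => p
  | p :: q :: ps => p ++ '-' :: pvJoinDash (q :: ps)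

theorem pvJoinDash_modHead (x p : List Char) (ps : List (List Char)) :
    pvJoinDash ((x ++ p) :: ps) = x ++ pvJoinDash (p :: ps) := by
  cases ps <;> simp [pvJoinDash]

theorem pvDropLast_flatten (rs : List (List Char)) (h : rs ≠ []) :
    ((rs.map (fun r => r ++ ['-'])).flatten).dropLast = pvJoinDash rs := by
  induction rs with
  | nil => exact absurd rfl h
  | cons r rest ih =>
    cases rest with
    | nil => simp [pvJoinDash]
    | cons q qs =>
      have hne : (((q :: qs).map (fun r => r ++ ['-'])).flatten) ≠ [] := by
        simp [List.flatten]
      rw [List.map_cons, List.flatten_cons, List.dropLast_append_of_ne_nil hne,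
        ih (by simp), pvJoinDash]
      simp

theorem pvSlice_neg_one (xs : List Char) :
    PySem.List.slice xs none (some (-1)) = xs.dropLast := by
  simp [PySem.List.slice, PySem.List.clampIdx, List.dropLast_eq_take]
  split <;> simp_all
  omega

-- B's flatMap equals the '-'-join of the piece-translated split pieces
theorem pvB_eq_joinDash (l : List Char) :
    l.flatMap pvPartB = pvJoinDash ((pvSplitDash l).map (fun r => r.flatMap pvPartA)) := by
  induction l with
  | nil => simp [pvSplitDash, pvJoinDash]
  | cons c r ih =>
    by_cases hc : c = '-'
    · subst hc
      simp only [pvSplitDash, if_pos rfl, List.flatMap_cons, ih, List.map_cons]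
      cases hsd : pvSplitDash r with
      | nil => exact absurd hsd (pvSplitDash_ne_nil r)
      | cons p ps => simp [pvJoinDash, pvPartB]
    · simp only [pvSplitDash, if_neg hc, List.flatMap_cons, ih, pvPartB_eq c hc]
      cases hsd : pvSplitDash r with
      | nil => exact absurd hsd (pvSplitDash_ne_nil r)
      | cons p ps =>
        simp only [List.map_cons, List.flatMap_cons]
        rw [pvJoinDash_modHead]

-- ===== VERDICT (by name: the statement is the Claim_ definition above) =====
theorem translate_fe_notation_spec : Claim_equal_translate_fe_notation := by
  intro s _
  unfold Spec_translate_fe_notation translate_fe_notation translate_fe_notation_alt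
  rw [pvSplitOn_eq]
  simp only [PySem.Chars.slice_eq_listSlice, pvOuterFold, List.nil_append, pvSlice_neg_one]
  rw [show List.map (fun r => List.flatMap pvPartA r ++ ['-']) (pvSplitDash s.toList)
        = List.map (fun r => r ++ ['-']) ((pvSplitDash s.toList).map (fun r => r.flatMap pvPartA)) by
      simp [List.map_map]]
  rw [pvDropLast_flatten _ (by simp [pvSplitDash_ne_nil])]
  rw [← List.flatMap_def, pvB_eq_joinDash]
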